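-- pv_equiv track=rewrite | github.com/cylanokim/Data_Analysis | python_Adv/calin-wilf tree.py | calkin_wilf
-- ===== SOURCE A (Python) =====
-- def calkin_wilf(A):
--     a = 1
--     b = 1
--     for i in A:
--         if i == 'L':
--             b += a
--         if i == 'R':
--             a += b
--     return (a, b)
-- ===== SOURCE B (Python) =====
-- def calkin_wilf(A):
--     # Filter to L/R moves, then process maximal runs with closed-form updates:
--     # a run of k 'L's does b += k*a, a run of k 'R's does a += k*b.
--     moves = [x for x in A if x == 'L' or x == 'R']
--     def go(ms, a, b):
--         if not ms:
--             return (a, b)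
--         m = ms[0]
--         k = 1
--         while k < len(ms) and ms[k] == m:
--             k += 1
--         if m == 'L':
--             return go(ms[k:], a, a * k + b)
--         return go(ms[k:], a + k * b, b)
--     return go(moves, 1, 1)
-- ===== Notes on version B (the rewrite author's own statement) =====
-- stated objective: alternative
-- what changed: B filters the input to L/R moves and processes maximal runs at once, applying the closed-form shear b += k*a (run of k L's) / a += k*b (run of k R's) per run instead of A's per-element conditional updates.
import Mathlib
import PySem

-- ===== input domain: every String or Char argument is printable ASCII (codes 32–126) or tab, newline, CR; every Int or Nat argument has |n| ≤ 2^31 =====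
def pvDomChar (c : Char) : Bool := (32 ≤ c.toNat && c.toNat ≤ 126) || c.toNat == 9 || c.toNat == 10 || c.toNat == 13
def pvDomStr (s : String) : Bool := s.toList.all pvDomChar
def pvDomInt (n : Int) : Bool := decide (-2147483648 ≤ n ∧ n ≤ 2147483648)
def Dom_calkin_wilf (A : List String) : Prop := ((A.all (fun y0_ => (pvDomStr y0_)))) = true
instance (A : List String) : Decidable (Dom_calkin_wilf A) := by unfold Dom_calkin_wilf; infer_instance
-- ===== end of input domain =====

-- B replaces A's per-element conditionals by a filter + run-length closed-form shear per run (objective: alternative).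

-- ===== PORT A =====
def cwStep (ab : Int × Int) (i : String) : Int × Int :=
  let a := ab.1
  let b := ab.2
  let b := if i == "L" then b + a else b
  let a := if i == "R" then a + b else a
  (a, b)

def calkin_wilf (A : List String) : Int × Int :=
  A.foldl cwStep (1, 1)

-- ===== PORT B =====
-- go(ms, a, b): consume the maximal run of ms[0] at once (ms[k:] = dropWhile)
def cwGo : List String → Int → Int → Int × Int
  | [], a, b => (a, b)
  | m :: rest, a, b =>
    let k : Int := 1 + (rest.takeWhile (fun x => x == m)).length
    if m == "L" then cwGo (rest.dropWhile (fun x => x == m)) a (a * k + b)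
    else cwGo (rest.dropWhile (fun x => x == m)) (a + k * b) b
termination_by ms _ _ => ms.length
decreasing_by
  · exact Nat.lt_succ_of_le (List.length_dropWhile_le _ _)
  · exact Nat.lt_succ_of_le (List.length_dropWhile_le _ _)

def calkin_wilf_alt (A : List String) : Int × Int :=
  cwGo (A.filter (fun x => x == "L" || x == "R")) 1 1

-- ===== PRECONDITION & SPEC =====
def Spec_calkin_wilf (A : List String) (out : Int × Int) : Prop := out = calkin_wilf_alt A
instance (A : List String) (out : Int × Int) : Decidable (Spec_calkin_wilf A out) := by unfold Spec_calkin_wilf; infer_instance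

-- ===== CLAIM (what is proved, stated in full; the proofs are below) =====
def Claim_equal_calkin_wilf : Prop := ∀ (A : List String), Dom_calkin_wilf A → Spec_calkin_wilf A (calkin_wilf A)

-- ===== LEMMAS AND PROOFS =====

lemma cwStep_id (ab : Int × Int) (x : String) (hL : x ≠ "L") (hR : x ≠ "R") :
    cwStep ab x = ab := by
  simp [cwStep, hL, hR]

lemma foldl_filter (A : List String) (ab : Int × Int) :
    A.foldl cwStep ab = (A.filter (fun x => x == "L" || x == "R")).foldl cwStep ab := by
  induction A generalizing ab with
  | nil => rfl
  | cons x xs ih =>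
    by_cases hL : x = "L"
    · simp [hL, List.filter, ih]
    · by_cases hR : x = "R"
      · simp [hR, List.filter, ih]
      · have : (x == "L" || x == "R") = false := by
          simp [hL, hR]
        simp [List.filter, this, cwStep_id _ _ hL hR, ih]

lemma foldl_rep_L (k : ℕ) (a b : Int) :
    (List.replicate k "L").foldl cwStep (a, b) = (a, b + k * a) := by
  induction k generalizing b with
  | zero => simp
  | succ n ih =>
    rw [List.replicate_succ, List.foldl_cons]
    have hstep : cwStep (a, b) "L" = (a, b + a) := by simp [cwStep]
    rw [hstep, ih]
    congr 1
    push_cast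
    ring

lemma foldl_rep_R (k : ℕ) (a b : Int) :
    (List.replicate k "R").foldl cwStep (a, b) = (a + k * b, b) := by
  induction k generalizing a with
  | zero => simp
  | succ n ih =>
    rw [List.replicate_succ, List.foldl_cons]
    have hstep : cwStep (a, b) "R" = (a + b, b) := by simp [cwStep]
    rw [hstep, ih]
    congr 1
    push_cast
    ring

lemma takeWhile_replicate (l : List String) (m : String) :
    l.takeWhile (fun x => x == m)
      = List.replicate (l.takeWhile (fun x => x == m)).length m := by
  induction l with
  | nil => rfl
  | cons x xs ih =>
    rw [List.takeWhile_cons]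
    by_cases h : (x == m) = true
    · rw [if_pos h]
      have hx : x = m := beq_iff_eq.mp h
      subst hx
      rw [List.length_cons, List.replicate_succ]
      exact congrArg (x :: ·) ih
    · rw [if_neg h]
      rfl

lemma main_lemma : ∀ (n : ℕ) (ms : List String), ms.length ≤ n →
    (∀ x ∈ ms, x = "L" ∨ x = "R") → ∀ a b : Int,
    ms.foldl cwStep (a, b) = cwGo ms a b := by
  intro n
  induction n with
  | zero =>
    intro ms hlen _ a b
    have hnil : ms = [] := List.length_eq_zero_iff.mp (Nat.le_zero.mp hlen)
    subst hnil
    simp [cwGo]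
  | succ n ih =>
    intro ms hlen hmem a b
    match ms with
    | [] => simp [cwGo]
    | m :: rest =>
      have hsplit : rest = rest.takeWhile (fun x => x == m) ++ rest.dropWhile (fun x => x == m) :=
        (List.takeWhile_append_dropWhile).symm
      set t := (rest.takeWhile (fun x => x == m)).length with ht
      have hrest' : (rest.dropWhile (fun x => x == m)).length ≤ n := by
        have := List.length_dropWhile_le (fun x => x == m) rest
        simp at hlen
        omega
      have hmem' : ∀ x ∈ rest.dropWhile (fun x => x == m), x = "L" ∨ x = "R" := by
        intro x hx
        exact hmem x (List.mem_cons_of_mem _ ((List.dropWhile_sublist _).subset hx))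
      have hrep : m :: rest.takeWhile (fun x => x == m) = List.replicate (t + 1) m := by
        rw [List.replicate_succ]
        exact congrArg (m :: ·) (takeWhile_replicate rest m)
      have key : List.foldl cwStep (a, b) (m :: rest)
          = List.foldl cwStep (List.foldl cwStep (a, b) (List.replicate (t + 1) m))
              (rest.dropWhile (fun x => x == m)) := by
        conv_lhs => rw [hsplit]
        rw [← List.cons_append, hrep, List.foldl_append]
      rcases hmem m (List.mem_cons_self) with hm | hm
      · subst hm
        rw [key, foldl_rep_L, ih _ hrest' hmem', cwGo,
          if_pos (show (("L" : String) == "L") = true by decide)]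
        congr 1
        push_cast
        ring
      · subst hm
        rw [key, foldl_rep_R, ih _ hrest' hmem', cwGo,
          if_neg (show ¬ (("R" : String) == "L") = true by decide)]
        congr 1
        push_cast
        ring

-- ===== VERDICT (by name: the statement is the Claim_ definition above) =====
theorem calkin_wilf_spec : Claim_equal_calkin_wilf := by
  intro A _
  unfold Spec_calkin_wilf calkin_wilf calkin_wilf_alt
  rw [foldl_filter]
  apply main_lemma (A.filter (fun x => x == "L" || x == "R")).length _ le_rfl
  intro x hx
  have := List.of_mem_filter hx
  rcases Bool.or_eq_true_iff.mp this with h | h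
  · left; exact (beq_iff_eq).mp h
  · right; exact (beq_iff_eq).mp h
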